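-- pv_equiv track=rewrite | github.com/ga0hyeon/programmers | DP/N으로 표현.py | solution
-- ===== SOURCE A (Python) =====
-- def matchAllCases(prevSet, count, N, number, repetitions):
--     if count == 8:
--         return -1
--     curSet = set({})
--     for val in prevSet:
--         if val + N == number or val - N == number or val * N == number or int(val / N) == number:
--             return count + 1
--         else:
--             curSet = curSet.union( {val + N, val - N, val * N, int(val / N)})
--     if count < 5:
--         curSet.add(repetitions[count])
--     return matchAllCases(prevSet.union(curSet), count + 1, N, number, repetitions)
--
-- def solution(N, number):
--     answer = 0
--     repetitions = [ 1, 11, 111, 1111, 11111 ]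
--     repetitions = [ x * N for x in repetitions ]
--
--     if number in repetitions:
--         answer = repetitions.index(number) + 1
--     else:
--         answer = matchAllCases({N}, 1, N, number, repetitions)
--
--     return answer
-- ===== SOURCE B (Python) =====
-- def solution(N, number):
--     repetitions = [x * N for x in [1, 11, 111, 1111, 11111]]
--     if number in repetitions:
--         return repetitions.index(number) + 1
--     seen = {N}
--     for count in range(1, 8):
--         if any(v + N == number or v - N == number or v * N == number
--                or int(v / N) == number for v in seen):
--             return count + 1
--         for v in list(seen):
--             seen |= {v + N, v - N, v * N, int(v / N)}
--         if count < 5: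
--             seen.add(repetitions[count])
--     return -1
-- ===== Notes on version B (the rewrite author's own statement) =====
-- stated objective: simpler
-- what changed: The tail recursion matchAllCases (helper with five threaded parameters and an early-returning build loop) is flattened into a single explicit for-loop over the level counter inside solution, with the hit test as one any(...) over the current set run before any set building on that level (A interleaves union building with the scan).
import Mathlib
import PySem

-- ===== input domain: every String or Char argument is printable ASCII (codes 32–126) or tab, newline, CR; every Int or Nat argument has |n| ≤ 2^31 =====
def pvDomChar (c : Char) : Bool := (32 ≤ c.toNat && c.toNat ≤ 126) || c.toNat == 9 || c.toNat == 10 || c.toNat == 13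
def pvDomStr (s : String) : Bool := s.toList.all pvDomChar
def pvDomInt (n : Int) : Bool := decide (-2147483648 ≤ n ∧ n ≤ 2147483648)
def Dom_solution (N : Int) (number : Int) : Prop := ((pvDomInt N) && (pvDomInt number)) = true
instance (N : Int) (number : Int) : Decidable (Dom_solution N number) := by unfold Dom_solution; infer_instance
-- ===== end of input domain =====

-- B flattens A's tail-recursive helper matchAllCases into one explicit loop over the level
-- counter inside solution (objective: simpler); same return value on every input in Pre_.


-- ===== PORT A =====
-- Hand-ported primitive shared by both sources' literal `int(val / N)`: CPython's int/int
-- true division is the CORRECTLY-ROUNDED (round-half-even, 53-bit significand) quotient,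
-- and int() truncates it toward zero. The model below computes exactly that in integer
-- arithmetic; it is exact whenever b ≠ 0 and the float quotient is finite and normal
-- (always the case here: a is a nonzero integer with |a| far below 2^1024). b = 0, where
-- Python raises ZeroDivisionError, is excluded by Pre_ (the helper returns 0 there).
def roundHalfEven (p q : Nat) : Nat :=
  let d := p / q
  let r := p % q
  if 2 * r < q then d else if q < 2 * r then d + 1 else if d % 2 = 0 then d else d + 1

def pyTrueDivTrunc (a b : Int) : Int :=
  if b = 0 ∨ a = 0 then 0
  else
    let A := a.natAbs
    let B := b.natAbs
    let e0 : Int := (Nat.log2 A : Int) - (Nat.log2 B : Int)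
    -- E = floor (log2 (A/B)) : e0 when 2^e0 ≤ A/B, else e0 - 1
    let E : Int := if B * 2 ^ e0.toNat ≤ A * 2 ^ (-e0).toNat then e0 else e0 - 1
    -- 53-bit significand m = round-half-even (A/B · 2^(52-E)), in [2^52, 2^53]
    let m := roundHalfEven (A * 2 ^ (52 - E).toNat) (B * 2 ^ (E - 52).toNat)
    let mE : Nat × Int := if m = 2 ^ 53 then (2 ^ 52, E + 1) else (m, E)
    -- the float value is mE.1 · 2^(mE.2 - 52); int() truncates toward zero
    let mag : Nat := if 52 ≤ mE.2 then mE.1 * 2 ^ (mE.2 - 52).toNat else mE.1 / 2 ^ (52 - mE.2).toNat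
    if (a < 0) ≠ (b < 0) then -(mag : Int) else (mag : Int)

-- the for-loop of matchAllCases: `none` = the early `return count + 1` was taken
def matchLoop (N : Int) (number : Int) (vals : List Int) (curSet : PySem.Set Int) :
    Option (PySem.Set Int) :=
  match vals with
  | [] => some curSet
  | v :: rest =>
    if v + N == number || v - N == number || v * N == number ||
        pyTrueDivTrunc v N == number then
      none
    else
      matchLoop N number rest
        (PySem.Set.union curSet [v + N, v - N, v * N, pyTrueDivTrunc v N])

def matchAllCases (prevSet : PySem.Set Int) (count : Int) (N : Int) (number : Int)
    (repetitions : List Int) : Int :=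
  if count == 8 then -1
  else if h : count < 8 then
    match matchLoop N number prevSet PySem.Set.empty with
    | none => count + 1
    | some curSet =>
      let curSet' := if count < 5 then
          PySem.Set.add curSet (PySem.List.pyGetD repetitions count 0)
        else curSet
      matchAllCases (PySem.Set.union prevSet curSet') (count + 1) N number repetitions
  else -1  -- totality guard only: Python recurses without bound for count > 8; never reached from solution
termination_by (8 - count).toNat
decreasing_by omega

def solution (N : Int) (number : Int) : Int :=
  let repetitions := [(1 : Int), 11, 111, 1111, 11111].map (fun x => x * N)
  if repetitions.contains number then
    ((PySem.List.index? repetitions number).getD 0 : Int) + 1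
  else
    matchAllCases (PySem.Set.ofList [N]) 1 N number repetitions

-- ===== PORT B =====
-- the explicit loop `for count in range(1, 8)` of Source B; `int(v / N)` is the same Python
-- construct as in A, modelled by the same hand-ported primitive pyTrueDivTrunc
def altLoop (N : Int) (number : Int) (repetitions : List Int) (seen : PySem.Set Int)
    (count : Nat) : Int :=
  if h : count < 8 then
    if seen.any (fun v => v + N == number || v - N == number || v * N == number ||
        pyTrueDivTrunc v N == number) then
      (count : Int) + 1
    else
      let seen1 := seen.foldl
        (fun s v => PySem.Set.union s [v + N, v - N, v * N, pyTrueDivTrunc v N]) seen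
      let seen2 := if count < 5 then
          PySem.Set.add seen1 (PySem.List.pyGetD repetitions (count : Int) 0)
        else seen1
      altLoop N number repetitions seen2 (count + 1)
  else -1
termination_by 8 - count

def solution_alt (N : Int) (number : Int) : Int :=
  let repetitions := [(1 : Int), 11, 111, 1111, 11111].map (fun x => x * N)
  if repetitions.contains number then
    ((PySem.List.index? repetitions number).getD 0 : Int) + 1
  else
    altLoop N number repetitions (PySem.Set.ofList [N]) 1

-- ===== PRECONDITION & SPEC =====
-- Pre_ excludes exactly the inputs on which A raises: N = 0 with number ≠ 0, where
-- `int(val / 0)` raises ZeroDivisionError (N = 0 with number = 0 takes the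
-- `number in repetitions` fast path and returns 1, so it stays inside).
def Pre_solution (N : Int) (number : Int) : Prop := N = 0 → number = 0
instance (N : Int) (number : Int) : Decidable (Pre_solution N number) := by
  unfold Pre_solution; infer_instance
def pvWitness_solution : Int × Int := (2, 7)

def Spec_solution (N : Int) (number : Int) (out : Int) : Prop := out = solution_alt N number
instance (N : Int) (number : Int) (out : Int) : Decidable (Spec_solution N number out) := by
  unfold Spec_solution; infer_instance

-- ===== CLAIM (what is proved, stated in full; the proofs are below) =====
def Claim_equal_solution : Prop := ∀ (N : Int) (number : Int), Dom_solution N number →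
  Pre_solution N number → Spec_solution N number (solution N number)

-- ===== LEMMAS AND PROOFS =====

-- A's for-loop, characterized: early return iff some val hits; else the accumulated curSet.
lemma matchLoop_eq (N number : Int) (vals : List Int) (cur : PySem.Set Int) :
    matchLoop N number vals cur =
      if vals.any (fun v => v + N == number || v - N == number || v * N == number ||
          pyTrueDivTrunc v N == number) then none
      else some (vals.foldl
        (fun s v => PySem.Set.union s [v + N, v - N, v * N, pyTrueDivTrunc v N]) cur) := by
  induction vals generalizing cur with
  | nil => simp [matchLoop]
  | cons v rest ih =>
    by_cases h : (v + N == number || v - N == number || v * N == number ||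
        pyTrueDivTrunc v N == number) = true
    · simp [matchLoop, h]
    · simp only [matchLoop, List.any_cons, List.foldl_cons, h, Bool.false_or]
      exact ih _

lemma update_ofList (s : PySem.Set Int) (l : List Int) :
    PySem.Set.update s (PySem.Set.ofList l) = PySem.Set.update s l := by
  rw [PySem.Set.update_eq_append_filter, PySem.Set.update_eq_append_filter,
    PySem.Set.ofList_ofList]

lemma foldl_union_eq_update (f : Int → List Int) :
    ∀ (l : List Int) (init : PySem.Set Int),
      l.foldl (fun s v => PySem.Set.union s (f v)) init =
        PySem.Set.update init (l.flatMap f) := by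
  intro l
  induction l with
  | nil => intro init; simp [PySem.Set.update]
  | cons v rest ih =>
    intro init
    simp only [List.foldl_cons, List.flatMap_cons]
    rw [ih, PySem.Set.update_append]
    rfl

lemma union_add (s c : PySem.Set Int) (x : Int) :
    PySem.Set.union s (PySem.Set.add c x) = PySem.Set.add (PySem.Set.union s c) x := by
  by_cases hx : x ∈ c
  · rw [PySem.Set.add_of_mem hx, PySem.Set.add_of_mem]
    exact (PySem.Set.mem_union s c x).mpr (Or.inr hx)
  · rw [PySem.Set.add_of_not_mem hx]
    show PySem.Set.update s (c ++ [x]) = _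
    rw [PySem.Set.update_append]
    rfl

-- A's `prevSet.union(curSet)` equals B's in-place accumulation from `seen`.
lemma union_foldl_empty (f : Int → List Int) (S : PySem.Set Int) :
    PySem.Set.union S
        (S.foldl (fun s v => PySem.Set.union s (f v)) PySem.Set.empty) =
      S.foldl (fun s v => PySem.Set.union s (f v)) S := by
  rw [foldl_union_eq_update, foldl_union_eq_update]
  show PySem.Set.update S (PySem.Set.update [] (S.flatMap f)) = _
  rw [PySem.Set.update_nil_left, update_ofList]

-- lockstep: A's recursion at Int count equals B's loop at Nat count, for every set S
lemma loop_eq (N number : Int) (reps : List Int) :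
    ∀ (k count : Nat) (S : PySem.Set Int), 8 - count ≤ k →
      matchAllCases S (count : Int) N number reps = altLoop N number reps S count := by
  intro k
  induction k with
  | zero =>
    intro count S hk
    have h8 : 8 ≤ count := by omega
    unfold matchAllCases altLoop
    have h1 : ¬ ((count : Int) < 8) := by exact_mod_cast not_lt.mpr h8
    have h2 : ¬ (count < 8) := by omega
    by_cases hc : count = 8
    · subst hc; simp
    · have h3 : ¬ ((count : Int) = 8) := by omega
      simp [h1, h2, h3]
  | succ k ih =>
    intro count S hk
    by_cases hlt : count < 8
    · have hne : ((count : Int) == 8) = false := by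
        simp; omega
      unfold matchAllCases altLoop
      simp only [hne, Bool.false_eq_true, if_false, dif_pos hlt,
        dif_pos (show (count : Int) < 8 by exact_mod_cast hlt)]
      rw [matchLoop_eq]
      by_cases hany : (S.any (fun v => v + N == number || v - N == number ||
          v * N == number || pyTrueDivTrunc v N == number)) = true
      · simp [hany]
      · simp only [hany, Bool.false_eq_true, if_false]
        have hc5 : ((count : Int) < 5) ↔ (count < 5) := by
          constructor <;> intro h <;> [exact_mod_cast h; exact_mod_cast h]
        have harg :
            PySem.Set.union S
              (if (count : Int) < 5 then
                PySem.Set.add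
                  (S.foldl (fun s v => PySem.Set.union s
                    [v + N, v - N, v * N, pyTrueDivTrunc v N]) PySem.Set.empty)
                  (PySem.List.pyGetD reps (count : Int) 0)
              else
                S.foldl (fun s v => PySem.Set.union s
                  [v + N, v - N, v * N, pyTrueDivTrunc v N]) PySem.Set.empty) =
            (if count < 5 then
                PySem.Set.add
                  (S.foldl (fun s v => PySem.Set.union s
                    [v + N, v - N, v * N, pyTrueDivTrunc v N]) S)
                  (PySem.List.pyGetD reps (count : Int) 0)
              else
                S.foldl (fun s v => PySem.Set.union s
                  [v + N, v - N, v * N, pyTrueDivTrunc v N]) S) := by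
          by_cases h5 : count < 5
          · rw [if_pos h5, if_pos (hc5.mpr h5), union_add,
              union_foldl_empty (fun v => [v + N, v - N, v * N, pyTrueDivTrunc v N])]
          · rw [if_neg h5, if_neg (fun h => h5 (hc5.mp h)),
              union_foldl_empty (fun v => [v + N, v - N, v * N, pyTrueDivTrunc v N])]
        rw [harg]
        have hcast : ((count : Int) + 1) = ((count + 1 : Nat) : Int) := by push_cast; ring
        rw [hcast]
        exact ih (count + 1) _ (by omega)
    · -- both sides return -1 (or count = 8)
      unfold matchAllCases altLoop
      have h1 : ¬ ((count : Int) < 8) := by exact_mod_cast hlt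
      by_cases hc : count = 8
      · subst hc; simp
      · have : ((count : Int) == 8) = false := by simp; omega
        simp [this, h1, hlt]

-- ===== VERDICT (by name: the statement is the Claim_ definition above) =====
theorem solution_spec : Claim_equal_solution := by
  intro N number _ _
  unfold Spec_solution solution solution_alt
  by_cases hmem :
      (([(1 : Int), 11, 111, 1111, 11111].map (fun x => x * N)).contains number) = true
  · simp only [hmem, if_true]
  · simp only [hmem, Bool.false_eq_true, if_false]
    exact loop_eq N number _ 8 1 (PySem.Set.ofList [N]) (by omega)
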